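-- pv_equiv track=rewrite | github.com/suyashsachdeva/Learning_Python | sasa/soyash.py | prob
-- ===== SOURCE A (Python) =====
-- def prob(n):
--     if n==1:
--         return 1
--     if n==2:
--         return 2
--
--     else:
--         m=n-1
--         return prob(n-1)+(m*prob(n-2))
-- ===== SOURCE B (Python) =====
-- def prob(n):
--     if n < 1:
--         raise ValueError("n must be >= 1")
--     a, b = 1, 1
--     for i in range(2, n + 1):
--         a, b = b, b + (i - 1) * a
--     return b
-- ===== Notes on version B (the rewrite author's own statement) =====
-- stated objective: faster
-- what changed: Replaced the naive double recursion with a bottom-up loop keeping only the last two values (intended as faster, linear vs exponential; a timing run sees A time out where B returns but cannot always certify a ratio since A rarely finishes); B raises ValueError where A hits RecursionError.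
-- outside the precondition, e.g. on prob(0): A raises RecursionError, B raises ValueError
import Mathlib
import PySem

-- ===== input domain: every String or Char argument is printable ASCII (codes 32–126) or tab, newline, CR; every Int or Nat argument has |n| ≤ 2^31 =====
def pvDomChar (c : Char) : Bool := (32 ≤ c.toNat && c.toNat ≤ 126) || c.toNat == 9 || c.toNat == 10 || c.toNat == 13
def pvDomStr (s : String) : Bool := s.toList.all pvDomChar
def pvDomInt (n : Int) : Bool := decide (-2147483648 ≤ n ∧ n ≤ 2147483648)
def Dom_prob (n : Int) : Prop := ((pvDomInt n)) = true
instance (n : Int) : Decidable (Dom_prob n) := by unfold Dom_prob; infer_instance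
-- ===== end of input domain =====

-- B replaces A's naive double recursion by a bottom-up loop keeping the last two values.


-- ===== PORT A =====
-- fuel only makes the recursion total; n.toNat + 1 fuel is always enough on Pre_
def probFuel : Nat → Int → Int
  | 0, _ => 0
  | f + 1, n =>
    if n == 1 then 1
    else if n == 2 then 2
    else probFuel f (n - 1) + (n - 1) * probFuel f (n - 2)

def prob (n : Int) : Int := probFuel (n.toNat + 1) n

-- ===== PORT B =====
-- for n < 1 the Python raises ValueError (outside Pre_); the port returns 0 there
def prob_alt (n : Int) : Int :=
  if n < 1 then 0
  else
    ((PySem.List.pyRange 2 (n + 1) 1).foldl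
      (fun (ab : Int × Int) i => (ab.2, ab.2 + (i - 1) * ab.1)) (1, 1)).2

-- ===== PRECONDITION & SPEC =====
-- Pre_ excludes n ≤ 0, where A recurses forever (Python: RecursionError; B raises ValueError there)
def Pre_prob (n : Int) : Prop := 1 ≤ n
instance (n : Int) : Decidable (Pre_prob n) := by unfold Pre_prob; infer_instance
def pvWitness_prob : Int := 5

def Spec_prob (n : Int) (out : Int) : Prop := out = prob_alt n
instance (n : Int) (out : Int) : Decidable (Spec_prob n out) := by unfold Spec_prob; infer_instance

-- ===== CLAIM (what is proved, stated in full; the proofs are below) =====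
def Claim_equal_prob : Prop := ∀ (n : Int), Dom_prob n → Pre_prob n → Spec_prob n (prob n)

-- ===== LEMMAS AND PROOFS =====

-- the mathematical sequence: g (n-1) is A's prob n
def g : Nat → Int
  | 0 => 1
  | 1 => 2
  | m + 2 => g (m + 1) + ((m : Int) + 2) * g m

lemma probFuel_eq : ∀ (f : Nat) (n : Int), 1 ≤ n → n.toNat ≤ f →
    probFuel f n = g (n.toNat - 1) := by
  intro f
  induction f with
  | zero => intro n h1 h2; omega
  | succ f ih =>
    intro n h1 h2
    by_cases hn1 : n = 1
    · subst hn1; simp [probFuel, g]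
    · by_cases hn2 : n = 2
      · subst hn2; simp [probFuel, g]
      · have h3 : 3 ≤ n := by omega
        have e1 : probFuel f (n - 1) = g ((n - 1).toNat - 1) := ih _ (by omega) (by omega)
        have e2 : probFuel f (n - 2) = g ((n - 2).toNat - 1) := ih _ (by omega) (by omega)
        simp only [probFuel, beq_iff_eq, hn1, hn2, if_false, e1, e2]
        obtain ⟨s, hs⟩ : ∃ s : Nat, n.toNat = s + 3 := ⟨n.toNat - 3, by omega⟩
        have h1' : (n - 1).toNat - 1 = s + 1 := by omega
        have h2' : (n - 2).toNat - 1 = s := by omega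
        have h3' : n.toNat - 1 = s + 2 := by omega
        rw [h1', h2', h3']
        have hn : n - 1 = ((s : Int) + 2) := by omega
        rw [hn]; simp [g]

lemma gfold : ∀ (k m : Nat),
    ((PySem.List.pyRange ((m : Int) + 3) ((m : Int) + 3 + k) 1).foldl
      (fun (ab : Int × Int) i => (ab.2, ab.2 + (i - 1) * ab.1)) (g m, g (m + 1)))
      = (g (m + k), g (m + k + 1)) := by
  intro k
  induction k with
  | zero => intro m; simp [PySem.List.pyRange]
  | succ k ih =>
    intro m
    rw [PySem.List.pyRange_one_cons (by push_cast; omega)]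
    simp only [List.foldl_cons]
    have hstep : ((g (m + 1), g (m + 1) + ((m : Int) + 3 - 1) * g m) : Int × Int)
        = (g (m + 1), g (m + 1 + 1)) := by
      have : ((m : Int) + 3 - 1) = ((m : Int) + 2) := by ring
      rw [this]; simp [g]
    have harg : (m : Int) + 3 + 1 = ((m + 1 : Nat) : Int) + 3 := by push_cast; ring
    have harg2 : (m : Int) + 3 + ((k : Nat) + 1 : Nat) = ((m + 1 : Nat) : Int) + 3 + k := by
      push_cast; ring
    rw [hstep, harg2, harg, ih (m + 1)]
    have : m + 1 + k = m + (k + 1) := by omega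
    rw [this]

-- ===== VERDICT (by name: the statement is the Claim_ definition above) =====
theorem prob_spec : Claim_equal_prob := by
  intro n _ hpre
  unfold Spec_prob prob prob_alt
  by_cases hn1 : n = 1
  · subst hn1; decide
  · have h2 : 2 ≤ n := lt_of_le_of_ne hpre (Ne.symm hn1)
    obtain ⟨s, hs⟩ : ∃ s : Nat, n.toNat = s + 2 := ⟨n.toNat - 2, by omega⟩
    have hA : probFuel (n.toNat + 1) n = g (n.toNat - 1) :=
      probFuel_eq _ n hpre (by omega)
    rw [hA, if_neg (by omega)]
    rw [PySem.List.pyRange_one_cons (by omega)]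
    simp only [List.foldl_cons]
    rw [show (((1 : Int), (1 : Int) + (2 - 1) * 1) : Int × Int) = (g 0, g 1) from by simp [g]]
    have hr1 : (2 : Int) + 1 = ((0 : Nat) : Int) + 3 := by norm_num
    have hr2 : n + 1 = ((0 : Nat) : Int) + 3 + (s : Nat) := by push_cast; omega
    rw [hr1, hr2]
    rw [show (g 1) = g (0 + 1) from rfl, gfold s 0]
    simp only [Nat.zero_add]
    congr 1
    omega
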